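-- pv_equiv track=rewrite | github.com/kittimonk/design-a-like-app | json-generator/src/build_model_v1_v10.py | collect_business_rules
-- ===== SOURCE A (Python) =====
-- def uniq(seq):
--     seen, out = set(), []
--     for x in seq:
--         k = str(x).strip().lower()
--         if k and k not in seen:
--             seen.add(k)
--             out.append(x)
--     return out
--
-- def collect_business_rules(v7):
--     out = []
--     for meta in v7.values():
--         for key in ("business_rules", "candidate_where_predicates"):
--             for rule in meta.get(key, []) or []:
--                 if rule.strip():
--                     out.append(rule.strip())
--     return uniq(out)
-- ===== SOURCE B (Python) =====
-- def collect_business_rules(v7):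
--     seen, out = set(), []
--     for meta in v7.values():
--         for key in ("business_rules", "candidate_where_predicates"):
--             for rule in meta.get(key, []) or []:
--                 s = rule.strip()
--                 if s:
--                     k = s.lower()
--                     if k not in seen:
--                         seen.add(k)
--                         out.append(s)
--     return out
-- ===== Notes on version B (the rewrite author's own statement) =====
-- stated objective: simpler
-- what changed: B folds collection and case-insensitive deduplication into a single traversal with one seen-set/output pair, removing A's intermediate rule list and the separate second-pass uniq helper.
import Mathlib
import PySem

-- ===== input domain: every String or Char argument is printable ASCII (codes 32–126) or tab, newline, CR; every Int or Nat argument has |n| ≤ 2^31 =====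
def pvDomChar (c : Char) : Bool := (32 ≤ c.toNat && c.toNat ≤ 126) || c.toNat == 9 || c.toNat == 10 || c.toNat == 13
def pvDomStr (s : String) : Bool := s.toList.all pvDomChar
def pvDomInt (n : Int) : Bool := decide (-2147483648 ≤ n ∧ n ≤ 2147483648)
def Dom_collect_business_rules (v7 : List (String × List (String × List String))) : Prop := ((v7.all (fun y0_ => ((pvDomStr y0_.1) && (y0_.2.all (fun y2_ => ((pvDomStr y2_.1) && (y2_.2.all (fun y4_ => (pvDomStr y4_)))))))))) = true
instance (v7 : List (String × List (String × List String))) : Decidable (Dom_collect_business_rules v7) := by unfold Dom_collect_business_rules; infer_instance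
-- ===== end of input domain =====

-- B folds collection and case-insensitive deduplication into one traversal with a single
-- seen-set/output pair, removing A's intermediate list and second uniq pass (objective: simpler).


-- ===== PORT A =====
-- the ("business_rules", "candidate_where_predicates") tuple
def pvKeys : List String := ["business_rules", "candidate_where_predicates"]

-- helper 'uniq(seq)' of A: seen-set + out-list fold; str(x) = x since x is a string
def uniq (seq : List String) : List String :=
  (seq.foldl
    (fun (st : PySem.Set String × List String) x =>
      let k := PySem.Str.lower (PySem.Str.strip x)
      if k ≠ "" ∧ ¬ st.1.contains k then (st.1.add k, st.2 ++ [x]) else st)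
    (PySem.Set.empty, [])).2

-- A: three nested loops appending stripped non-empty rules, then uniq over the whole list;
-- 'm_.get(key, []) or []' is the let/if; inner dict lookup = first match (PySem.Dict.getD on the assoc list)
def collect_business_rules (v7 : List (String × List (String × List String))) : List String :=
  let out := v7.foldl
    (fun out m_ =>
      pvKeys.foldl
        (fun out key =>
          (let v := PySem.Dict.getD ⟨m_.2⟩ key []
           if v = [] then [] else v).foldl
            (fun out rule =>
              if PySem.Str.strip rule ≠ "" then out ++ [PySem.Str.strip rule] else out)
            out)
        out)
    []
  uniq out

-- ===== PORT B =====
-- B: one traversal; the state is (seen keys, output); no intermediate list, no second pass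
def collect_business_rules_alt (v7 : List (String × List (String × List String))) : List String :=
  (v7.foldl
    (fun (st : PySem.Set String × List String) m_ =>
      pvKeys.foldl
        (fun st key =>
          (let v := PySem.Dict.getD ⟨m_.2⟩ key []
           if v = [] then [] else v).foldl
            (fun st rule =>
              let s := PySem.Str.strip rule
              if s ≠ "" then
                let k := PySem.Str.lower s
                if ¬ st.1.contains k then (st.1.add k, st.2 ++ [s]) else st
              else st)
            st)
        st)
    (PySem.Set.empty, [])).2

-- ===== PRECONDITION & SPEC =====
def Spec_collect_business_rules (v7 : List (String × List (String × List String))) (out : List String) : Prop := out = collect_business_rules_alt v7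
instance (v7 : List (String × List (String × List String))) (out : List String) : Decidable (Spec_collect_business_rules v7 out) := by unfold Spec_collect_business_rules; infer_instance

-- ===== CLAIM (what is proved, stated in full; the proofs are below) =====
def Claim_equal_collect_business_rules : Prop := ∀ (v7 : List (String × List (String × List String))), Dom_collect_business_rules v7 → Spec_collect_business_rules v7 (collect_business_rules v7)

-- ===== LEMMAS AND PROOFS =====

-- the deduplication step both programs perform, on an already-stripped non-empty string
def dStep (st : PySem.Set String × List String) (s : String) : PySem.Set String × List String :=
  if ¬ st.1.contains (PySem.Str.lower s) then (st.1.add (PySem.Str.lower s), st.2 ++ [s]) else st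

-- the list A collects before calling uniq, as a flatMap/filter/map expression
def ruleList (v7 : List (String × List (String × List String))) : List String :=
  v7.flatMap (fun m_ =>
    pvKeys.flatMap (fun key =>
      ((PySem.Dict.getD (⟨m_.2⟩ : PySem.Dict String (List String)) key []).filter
          (fun r => decide (PySem.Str.strip r ≠ ""))).map PySem.Str.strip))

-- 'v or []' is v for a list value
theorem or_empty (v : List String) : (if v = [] then [] else v) = v := by
  split <;> simp_all

theorem dropWhile_reverse_dropWhile {α : Type} (p : α → Bool) (m : List α)
    (h : m.dropWhile p = m) :
    ((m.reverse.dropWhile p).reverse).dropWhile p = (m.reverse.dropWhile p).reverse := by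
  have hsuf : m.reverse.dropWhile p <:+ m.reverse := List.dropWhile_suffix p
  have hpre : (m.reverse.dropWhile p).reverse <+: m := by
    have := hsuf.reverse
    simpa using this
  obtain ⟨t, ht⟩ := hpre
  cases hr : (m.reverse.dropWhile p).reverse with
  | nil => simp
  | cons a r' =>
    rw [hr] at ht
    have hpa : p a = false := by
      by_cases hpa : p a = true
      · exfalso
        rw [← ht, List.cons_append, List.dropWhile_cons_of_pos hpa] at h
        have := List.length_dropWhile_le p (r' ++ t)
        rw [h] at this
        simp at this
      · simpa using hpa
    rw [List.dropWhile_cons_of_neg (by simp [hpa])]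

theorem chars_strip_idem (l : List Char) :
    PySem.Chars.strip (PySem.Chars.strip l) = PySem.Chars.strip l := by
  simp only [PySem.Chars.strip, PySem.Chars.lstrip, PySem.Chars.rstrip]
  rw [dropWhile_reverse_dropWhile _ _ (List.dropWhile_idempotent _ _), List.reverse_reverse]
  exact dropWhile_reverse_dropWhile _ _ (List.dropWhile_idempotent _ _)

theorem str_strip_idem (s : String) :
    PySem.Str.strip (PySem.Str.strip s) = PySem.Str.strip s := by
  apply String.toList_inj.mp
  rw [PySem.Str.toList_strip, PySem.Str.toList_strip]
  exact chars_strip_idem _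

theorem str_lower_eq_empty_iff (s : String) : PySem.Str.lower s = "" ↔ s = "" := by
  rw [← String.toList_inj, ← String.toList_inj, PySem.Str.toList_lower]
  simp [PySem.Chars.lower]

-- A's collected list IS ruleList
theorem collect_eq_uniq_ruleList (v7 : List (String × List (String × List String))) :
    collect_business_rules v7 = uniq (ruleList v7) := by
  unfold collect_business_rules ruleList
  simp only [or_empty, PySem.List.foldl_append_ite, PySem.List.foldl_append_eq_flatMap,
    List.nil_append]

-- B's innermost loop = dStep folded over the stripped, filtered rules
theorem b_inner_eq_dStep (rules : List String) (st : PySem.Set String × List String) :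
    rules.foldl
      (fun st rule =>
        let s := PySem.Str.strip rule
        if s ≠ "" then
          let k := PySem.Str.lower s
          if ¬ st.1.contains k then (st.1.add k, st.2 ++ [s]) else st
        else st) st
    = ((rules.filter (fun r => decide (PySem.Str.strip r ≠ ""))).map PySem.Str.strip).foldl dStep st := by
  induction rules generalizing st with
  | nil => rfl
  | cons r rs ih =>
    rw [List.foldl_cons, List.filter_cons]
    by_cases h : PySem.Str.strip r ≠ ""
    · rw [if_pos h, if_pos (show decide (PySem.Str.strip r ≠ "") = true by simpa using h),
        List.map_cons, List.foldl_cons, ih]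
      rfl
    · rw [if_neg h, if_neg (show ¬ decide (PySem.Str.strip r ≠ "") = true by simpa using h), ih]

-- B = dStep folded over ruleList
theorem b_eq_foldl_dStep (v7 : List (String × List (String × List String))) :
    collect_business_rules_alt v7 = ((ruleList v7).foldl dStep (PySem.Set.empty, [])).2 := by
  unfold collect_business_rules_alt ruleList
  congr 1
  rw [List.foldl_flatMap]
  apply PySem.List.foldl_congr_mem
  intro st m_ _
  rw [List.foldl_flatMap]
  apply PySem.List.foldl_congr_mem
  intro st key _
  rw [or_empty]
  exact b_inner_eq_dStep _ _

-- uniq's step coincides with dStep on stripped non-empty strings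
theorem uniq_eq_foldl_dStep (xs : List String) (st : PySem.Set String × List String)
    (h : ∀ x ∈ xs, PySem.Str.strip x = x ∧ x ≠ "") :
    xs.foldl
      (fun (st : PySem.Set String × List String) x =>
        let k := PySem.Str.lower (PySem.Str.strip x)
        if k ≠ "" ∧ ¬ st.1.contains k then (st.1.add k, st.2 ++ [x]) else st) st
    = xs.foldl dStep st := by
  induction xs generalizing st with
  | nil => simp only [List.foldl_nil]
  | cons x xs ih =>
    obtain ⟨hs, hne⟩ := h x (List.mem_cons_self ..)
    have hk : PySem.Str.lower (PySem.Str.strip x) ≠ "" := by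
      rw [hs, ne_eq, str_lower_eq_empty_iff]; exact hne
    have hk' : ¬ PySem.Str.lower x = "" := by rw [hs] at hk; exact hk
    have hstep : (let k := PySem.Str.lower (PySem.Str.strip x)
        if k ≠ "" ∧ ¬ st.1.contains k then (st.1.add k, st.2 ++ [x]) else st) = dStep st x := by
      simp only [dStep, hs, ne_eq, hk', not_false_eq_true, true_and]
    rw [List.foldl_cons, List.foldl_cons, hstep, ih _ (fun y hy => h y (List.mem_cons_of_mem _ hy))]

-- every element of ruleList is stripped and non-empty
theorem ruleList_stripped (v7 : List (String × List (String × List String))) :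
    ∀ x ∈ ruleList v7, PySem.Str.strip x = x ∧ x ≠ "" := by
  intro x hx
  simp only [ruleList, List.mem_flatMap, List.mem_map, List.mem_filter] at hx
  obtain ⟨m_, _, key, _, r, ⟨_, hr⟩, rfl⟩ := hx
  simp only [decide_eq_true_eq] at hr
  exact ⟨str_strip_idem r, hr⟩

-- ===== VERDICT (by name: the statement is the Claim_ definition above) =====
theorem collect_business_rules_spec : Claim_equal_collect_business_rules := by
  intro v7 _
  unfold Spec_collect_business_rules
  rw [collect_eq_uniq_ruleList, b_eq_foldl_dStep, uniq,
    uniq_eq_foldl_dStep _ _ (ruleList_stripped v7)]
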